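-- pv_equiv track=rewrite | github.com/ilambrev/freeCodeCamp-Daily-Challenges | Python_Solutions/2026_01/2026_01_20_consonant_case.py | to_consonant_case
-- ===== SOURCE A (Python) =====
-- from string import ascii_letters
--
-- def to_consonant_case(s):
--     symbols = [symbol for symbol in s]
--     vowels = "aeiou"
--
--     for i in range(len(symbols)):
--         current_symbol = symbols[i]
--         if current_symbol.lower() in vowels:
--             symbols[i] = current_symbol.lower()
--         elif current_symbol in ascii_letters:
--             symbols[i] = current_symbol.upper()
--         elif current_symbol == "-":
--             symbols[i] = "_"
--
--     return "".join(symbols)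
-- ===== SOURCE B (Python) =====
-- from string import ascii_letters
--
-- _VOWELS = "aeiouAEIOU"
-- _TABLE = str.maketrans(
--     {**{v: v.lower() for v in _VOWELS},
--      **{c: c.upper() for c in ascii_letters if c not in _VOWELS},
--      "-": "_"}
-- )
--
-- def to_consonant_case(s):
--     return s.translate(_TABLE)
-- ===== Notes on version B (the rewrite author's own statement) =====
-- stated objective: idiomatic
-- what changed: Replaces the per-character if/elif branch loop with a translation table built once at module load (str.maketrans) and a single s.translate(table) call.
import Mathlib
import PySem

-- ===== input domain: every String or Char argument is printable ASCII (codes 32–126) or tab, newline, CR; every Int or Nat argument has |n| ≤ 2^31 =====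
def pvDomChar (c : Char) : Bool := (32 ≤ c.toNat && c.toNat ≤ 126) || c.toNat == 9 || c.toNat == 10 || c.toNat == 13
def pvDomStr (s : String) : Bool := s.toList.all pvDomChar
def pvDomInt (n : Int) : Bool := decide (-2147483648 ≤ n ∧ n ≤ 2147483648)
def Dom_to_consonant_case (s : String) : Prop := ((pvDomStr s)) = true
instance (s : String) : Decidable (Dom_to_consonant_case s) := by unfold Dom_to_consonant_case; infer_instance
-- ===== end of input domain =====

-- B builds a translation table once (str.maketrans) and translates in one call,
-- replacing A's per-character if/elif loop; equivalence of return values is proved on Dom.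

-- ===== PORT A =====
-- ascii_letters, as a list of chars (string.ascii_letters)
def pvAsciiLetters : List Char :=
  "abcdefghijklmnopqrstuvwxyzABCDEFGHIJKLMNOPQRSTUVWXYZ".toList

-- the for-loop over range(len(symbols)): each symbols[i] is rewritten independently,
-- branches in A's order
def pvLoopA : List Char → List Char
  | [] => []
  | c :: rest =>
    (if PySem.Chars.lowerChar c ∈ "aeiou".toList then PySem.Chars.lowerChar c
     else if c ∈ pvAsciiLetters then PySem.Chars.upperChar c
     else if c = '-' then '_'
     else c) :: pvLoopA rest

def to_consonant_case (s : String) : String :=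
  String.mk (pvLoopA s.toList)

-- ===== PORT B =====
-- the dict handed to str.maketrans: vowels ↦ lowercase, remaining letters ↦ uppercase, '-' ↦ '_'
def pvTable : PySem.Dict Char Char :=
  let d := "aeiouAEIOU".toList.foldl
    (fun d v => d.insert v (PySem.Chars.lowerChar v)) PySem.Dict.empty
  let d := (pvAsciiLetters.filter (fun c => c ∉ "aeiouAEIOU".toList)).foldl
    (fun d c => d.insert c (PySem.Chars.upperChar c)) d
  d.insert '-' '_'

-- s.translate(table): chars absent from the table pass through unchanged
def to_consonant_case_alt (s : String) : String :=
  String.mk (s.toList.map (fun c => pvTable.getD c c))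

-- ===== PRECONDITION & SPEC =====
def Spec_to_consonant_case (s : String) (out : String) : Prop := out = to_consonant_case_alt s
instance (s : String) (out : String) : Decidable (Spec_to_consonant_case s out) := by unfold Spec_to_consonant_case; infer_instance

-- ===== CLAIM (what is proved, stated in full; the proofs are below) =====
def Claim_equal_to_consonant_case : Prop := ∀ (s : String), Dom_to_consonant_case s → Spec_to_consonant_case s (to_consonant_case s)

-- ===== LEMMAS AND PROOFS =====

-- A's per-character branch and B's table lookup, as functions on one char
def pvStepA (c : Char) : Char :=
  if PySem.Chars.lowerChar c ∈ "aeiou".toList then PySem.Chars.lowerChar c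
  else if c ∈ pvAsciiLetters then PySem.Chars.upperChar c
  else if c = '-' then '_'
  else c

-- per-character agreement on all ASCII codes, checked by the kernel
set_option maxRecDepth 8192 in
theorem pvChar_agree :
    ((List.range 128).all
      (fun n => pvStepA (Char.ofNat n) == pvTable.getD (Char.ofNat n) (Char.ofNat n))) = true := by
  decide

theorem pvChar_agree' (c : Char) (h : pvDomChar c = true) :
    pvStepA c = pvTable.getD c c := by
  have hn : c.toNat < 128 := by
    simp only [pvDomChar, Bool.or_eq_true, Bool.and_eq_true, decide_eq_true_eq,
      beq_iff_eq] at h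
    omega
  have := List.all_eq_true.mp pvChar_agree c.toNat (List.mem_range.mpr hn)
  rw [Char.ofNat_toNat] at this
  exact beq_iff_eq.mp this

theorem pvLoopA_eq_map (l : List Char) (h : l.all pvDomChar = true) :
    pvLoopA l = l.map (fun c => pvTable.getD c c) := by
  induction l with
  | nil => rfl
  | cons c rest ih =>
    simp only [List.all_cons, Bool.and_eq_true] at h
    have hc := pvChar_agree' c h.1
    simp only [pvStepA] at hc
    simp only [pvLoopA, List.map_cons, hc, ih h.2]

-- ===== VERDICT (by name: the statement is the Claim_ definition above) =====
theorem to_consonant_case_spec : Claim_equal_to_consonant_case := by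
  intro s hdom
  unfold Spec_to_consonant_case to_consonant_case to_consonant_case_alt
  rw [pvLoopA_eq_map s.toList hdom]
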